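-- pv_equiv track=rewrite | github.com/MSA-FullStack-Developer/Study-Algorithm | dahye/Programmers/124나라의숫자_DP.py | solution
-- ===== SOURCE A (Python) =====
-- def solution(n):
--     answer = ''
--
--     DP=["0","1","2","4"]
--
--     for i in range(4,n+1):
--         if i%3==0:
--             DP.append(DP[int(i/3)-1]+'4')
--         else:
--             DP.append(DP[int(i/3)]+DP[i%3])
--
--     answer=DP[n]
--
--     return answer
-- ===== SOURCE B (Python) =====
-- def solution(n):
--     if n <= 0:
--         return "0" if n == 0 else ""
--     digits = []
--     while n > 0:
--         r = n % 3
--         n = n // 3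
--         if r == 0:
--             n -= 1
--             digits.append("4")
--         else:
--             digits.append(str(r))
--     return "".join(reversed(digits))
-- ===== Notes on version B (the rewrite author's own statement) =====
-- stated objective: faster
-- what changed: Replaces the O(n)-size DP table (answer strings for every value up to n) with direct digit extraction by repeated division by 3, emitting '4' for remainder 0, so only O(log n) digits are computed.
-- intended difference: For -4 <= n <= -1 A returns '0','1','2','4' by Python negative-index wraparound into the 4-element DP seed; B returns '' because a negative n has no 124-country representation; the wraparound values are an accident of A's list indexing. — e.g. on solution(-1): A returns "4", B returns ""
import Mathlib
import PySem

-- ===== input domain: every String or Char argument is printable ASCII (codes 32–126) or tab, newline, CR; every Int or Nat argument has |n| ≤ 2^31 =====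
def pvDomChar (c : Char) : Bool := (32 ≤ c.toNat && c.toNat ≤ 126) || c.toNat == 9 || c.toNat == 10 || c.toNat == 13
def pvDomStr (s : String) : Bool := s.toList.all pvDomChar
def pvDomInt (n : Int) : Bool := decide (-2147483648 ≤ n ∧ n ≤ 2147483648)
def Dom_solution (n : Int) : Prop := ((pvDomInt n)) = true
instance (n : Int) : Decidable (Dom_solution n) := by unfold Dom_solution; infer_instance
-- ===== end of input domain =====

-- B replaces the O(n)-size DP table with direct repeated division by 3 (O(log n) digits);
-- on negative n (unspecified for this task) B returns "" instead of A's wraparound values, see D_solution.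

-- ===== PORT A =====
-- one loop iteration: DP.append(...)
-- Note: Python's int(i/3) (float division, truncated) equals i // 3 for every i in range(4, n+1)
-- with n ≤ 2^31 (the quotient is exactly representable, the fraction never rounds up to an integer),
-- so it is ported as PySem.Int.floordiv i 3.
def stepA (DP : List String) (i : Int) : List String :=
  if PySem.Int.mod i 3 = 0 then
    DP ++ [((PySem.List.pyGet? DP (PySem.Int.floordiv i 3 - 1)).getD "") ++ "4"]
  else
    DP ++ [((PySem.List.pyGet? DP (PySem.Int.floordiv i 3)).getD "")
            ++ ((PySem.List.pyGet? DP (PySem.Int.mod i 3)).getD "")]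

def solution (n : Int) : String :=
  let DP := (PySem.List.pyRange 4 (n + 1) 1).foldl stepA ["0", "1", "2", "4"]
  (PySem.List.pyGet? DP n).getD ""   -- DP[n]: none (IndexError) is excluded by Pre_solution

-- ===== PORT B =====
-- the while-loop of Source B, with fuel n.toNat (the loop variable strictly decreases each round,
-- so n.toNat rounds always suffice); digits are collected least-significant first, as in Source B
def altGo (fuel : Nat) (n : Int) : List String :=
  match fuel with
  | 0 => []
  | fuel + 1 =>
    if 0 < n then
      if PySem.Int.mod n 3 = 0 then
        "4" :: altGo fuel (PySem.Int.floordiv n 3 - 1)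
      else
        PySem.Int.toStr (PySem.Int.mod n 3) :: altGo fuel (PySem.Int.floordiv n 3)
    else []

def solution_alt (n : Int) : String :=
  if n ≤ 0 then (if n = 0 then "0" else "")
  else PySem.Str.join "" (altGo n.toNat n).reverse

-- ===== PRECONDITION & SPEC =====
-- A raises IndexError (DP[n] on the 4-element seed) exactly when n ≤ -5.
def Pre_solution (n : Int) : Prop := -4 ≤ n
instance (n : Int) : Decidable (Pre_solution n) := by unfold Pre_solution; infer_instance
def pvWitness_solution : Int := 5

-- For -4 ≤ n ≤ -1 A returns "0","1","2","4" by Python negative-index wraparound into the DP seed;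
-- B returns "" because a negative n has no 124-country representation; A's values are accidental.
def D_solution (n : Int) : Prop := n < 0
instance (n : Int) : Decidable (D_solution n) := by unfold D_solution; infer_instance

def Spec_solution (n : Int) (out : String) : Prop := ¬ D_solution n → out = solution_alt n
instance (n : Int) (out : String) : Decidable (Spec_solution n out) := by unfold Spec_solution; infer_instance

def pvDiffWitness_solution : Int := -1
def pvDiffWitnessOut_solution : String × String := ("4", "")

-- ===== CLAIM =====
def Claim_unchanged_solution : Prop := ∀ (n : Int), Dom_solution n → Pre_solution n → Spec_solution n (solution n)
def Claim_changed_solution : Prop := Dom_solution (pvDiffWitness_solution) ∧ Pre_solution (pvDiffWitness_solution) ∧ D_solution (pvDiffWitness_solution) ∧ solution (pvDiffWitness_solution) = pvDiffWitnessOut_solution.1 ∧ solution_alt (pvDiffWitness_solution) = pvDiffWitnessOut_solution.2 ∧ pvDiffWitnessOut_solution.1 ≠ pvDiffWitnessOut_solution.2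
def Claim_exact_solution : Prop := ∀ (n : Int), Dom_solution n → Pre_solution n → D_solution n → solution n ≠ solution_alt n

-- ===== LEMMAS AND PROOFS =====

theorem ic (l : List (List Char)) : List.intercalate [] l = l.flatten := by
  induction l with
  | nil => simp [List.intercalate]
  | cons a t ih => cases t <;> simp_all [List.intercalate, List.intersperse]

-- "".join(parts + [x]) = "".join(parts) + x
theorem joinE (l : List String) (x : String) :
    PySem.Str.join "" (l ++ [x]) = PySem.Str.join "" l ++ x := by
  simp [PySem.Str.join, PySem.Chars.join, ic, List.flatten_append, String.ofList_append,
    String.ofList_toList]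

theorem altGo_nonpos (fuel : Nat) (n : Int) (h : n ≤ 0) : altGo fuel n = [] := by
  cases fuel <;> simp [altGo, (show ¬ (0:Int) < n from by omega)]

theorem altGo_fuel_irrel (k fuel fuel' : Nat) (n : Int) (hk : n.toNat ≤ k)
    (h : n.toNat ≤ fuel) (h' : n.toNat ≤ fuel') : altGo fuel n = altGo fuel' n := by
  induction k generalizing fuel fuel' n with
  | zero =>
    rw [altGo_nonpos fuel n (by omega), altGo_nonpos fuel' n (by omega)]
  | succ k ih =>
    by_cases hn : 0 < n
    · have hq : PySem.Int.floordiv n 3 = n / 3 := PySem.Int.floordiv_eq_ediv_of_pos (by norm_num)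
      obtain ⟨f, rfl⟩ : ∃ f, fuel = f + 1 := ⟨fuel - 1, by omega⟩
      obtain ⟨f', rfl⟩ : ∃ f', fuel' = f' + 1 := ⟨fuel' - 1, by omega⟩
      simp only [altGo, hn, if_true]
      split
      · rw [ih f f' (PySem.Int.floordiv n 3 - 1) (by rw [hq]; omega) (by rw [hq]; omega)
            (by rw [hq]; omega)]
      · rw [ih f f' (PySem.Int.floordiv n 3) (by rw [hq]; omega) (by rw [hq]; omega)
            (by rw [hq]; omega)]
    · rw [altGo_nonpos fuel n (by omega), altGo_nonpos fuel' n (by omega)]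

-- unfolding solution_alt one digit at a time, for arguments ≥ 1
theorem alt_pos (q : Int) (hq : 0 < q) :
    solution_alt q = PySem.Str.join "" (altGo q.toNat q).reverse := by
  simp [solution_alt, (show ¬ q ≤ 0 from by omega)]

theorem rec_mod0 (i : Int) (h4 : 4 ≤ i) (h0 : PySem.Int.mod i 3 = 0) :
    solution_alt i = solution_alt (PySem.Int.floordiv i 3 - 1) ++ "4" := by
  have hm : PySem.Int.mod i 3 = i % 3 := PySem.Int.mod_eq_emod_of_pos (by norm_num)
  have hq : PySem.Int.floordiv i 3 = i / 3 := PySem.Int.floordiv_eq_ediv_of_pos (by norm_num)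
  have h6 : 6 ≤ i := by omega
  obtain ⟨t, ht⟩ : ∃ t, i.toNat = t + 1 := ⟨i.toNat - 1, by omega⟩
  rw [alt_pos i (by omega), ht,
    show altGo (t + 1) i = "4" :: altGo t (PySem.Int.floordiv i 3 - 1) from by
      simp only [altGo]; rw [if_pos (show (0:Int) < i from by omega), if_pos h0],
    List.reverse_cons, joinE,
    altGo_fuel_irrel (PySem.Int.floordiv i 3 - 1).toNat t (PySem.Int.floordiv i 3 - 1).toNat
      _ le_rfl (by rw [hq]; omega) le_rfl,
    ← alt_pos _ (by rw [hq]; omega)]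

theorem rec_modne (i : Int) (h4 : 4 ≤ i) (h0 : ¬ PySem.Int.mod i 3 = 0) :
    solution_alt i = solution_alt (PySem.Int.floordiv i 3) ++ solution_alt (PySem.Int.mod i 3) := by
  have hm : PySem.Int.mod i 3 = i % 3 := PySem.Int.mod_eq_emod_of_pos (by norm_num)
  have hq : PySem.Int.floordiv i 3 = i / 3 := PySem.Int.floordiv_eq_ediv_of_pos (by norm_num)
  obtain ⟨t, ht⟩ : ∃ t, i.toNat = t + 1 := ⟨i.toNat - 1, by omega⟩
  rw [alt_pos i (by omega), ht,
    show altGo (t + 1) i = PySem.Int.toStr (PySem.Int.mod i 3) :: altGo t (PySem.Int.floordiv i 3)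
      from by simp only [altGo]; rw [if_pos (show (0:Int) < i from by omega), if_neg h0],
    List.reverse_cons, joinE,
    altGo_fuel_irrel (PySem.Int.floordiv i 3).toNat t (PySem.Int.floordiv i 3).toNat
      _ le_rfl (by rw [hq]; omega) le_rfl,
    ← alt_pos _ (by rw [hq]; omega)]
  have h12 : PySem.Int.mod i 3 = 1 ∨ PySem.Int.mod i 3 = 2 := by rw [hm]; omega
  have key : PySem.Int.toStr (PySem.Int.mod i 3) = solution_alt (PySem.Int.mod i 3) := by
    rcases h12 with h | h <;> rw [h] <;> decide
  rw [key]

theorem dp_inv (m : Nat) (h3 : 3 ≤ m) :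
    (PySem.List.pyRange 4 ((m : Int) + 1) 1).foldl stepA ["0", "1", "2", "4"]
      = (List.range (m + 1)).map (fun k : Nat => solution_alt (k : Int)) := by
  induction m with
  | zero => omega
  | succ m ih =>
    by_cases hm : 3 ≤ m
    · have hcast : ((m + 1 : Nat) : Int) + 1 = ((m : Int) + 1) + 1 := by push_cast; ring
      rw [hcast, PySem.List.pyRange_one_succ_right (by exact_mod_cast Nat.le_of_lt_succ (by omega)),
        List.foldl_append, ih hm]
      set L := (List.range (m + 1)).map (fun k : Nat => solution_alt (k : Int)) with hL
      have hi : ((m : Int) + 1) = ((m + 1 : Nat) : Int) := by push_cast; ring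
      have hget : ∀ k : Nat, k < m + 1 →
          (PySem.List.pyGet? L (k : Int)).getD "" = solution_alt (k : Int) := by
        intro k hk
        rw [PySem.List.pyGet?_natCast, hL]
        simp [hk]
      have hmod : PySem.Int.mod ((m + 1 : Nat) : Int) 3 = (((m + 1) % 3 : Nat) : Int) :=
        PySem.Int.mod_natCast (m + 1) 3
      have hdiv : PySem.Int.floordiv ((m + 1 : Nat) : Int) 3 = (((m + 1) / 3 : Nat) : Int) :=
        PySem.Int.floordiv_natCast (m + 1) 3
      simp only [List.foldl_cons, List.foldl_nil]
      rw [List.range_succ (n := m + 1), List.map_append, hi, stepA]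
      by_cases hc : PySem.Int.mod ((m + 1 : Nat) : Int) 3 = 0
      · rw [if_pos hc]
        have hz : (m + 1) % 3 = 0 := by
          rw [hmod] at hc; exact_mod_cast hc
        have hq1 : 1 ≤ (m + 1) / 3 := by omega
        have hqc : PySem.Int.floordiv ((m + 1 : Nat) : Int) 3 - 1 = (((m + 1) / 3 - 1 : Nat) : Int) := by
          rw [hdiv]; omega
        simp only [List.map_cons, List.map_nil]
        rw [hqc, hget ((m + 1) / 3 - 1) (by omega),
          rec_mod0 ((m + 1 : Nat) : Int) (by exact_mod_cast (by omega : 4 ≤ m + 1)) hc, hqc]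
      · rw [if_neg hc]
        have hz : ¬ (m + 1) % 3 = 0 := by
          intro h; apply hc; rw [hmod, h]; rfl
        have hmc : PySem.Int.mod ((m + 1 : Nat) : Int) 3 = (((m + 1) % 3 : Nat) : Int) := hmod
        simp only [List.map_cons, List.map_nil]
        rw [hdiv, hget ((m + 1) / 3) (by omega), hmod, hget ((m + 1) % 3) (by omega),
          rec_modne ((m + 1 : Nat) : Int) (by exact_mod_cast (by omega : 4 ≤ m + 1)) hc, hdiv, hmod]
    · interval_cases m <;> simp_all <;> decide

-- ===== VERDICT =====
theorem solution_spec : Claim_unchanged_solution := by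
  intro n _ _ hnd
  have hn : 0 ≤ n := by unfold D_solution at hnd; omega
  by_cases hs : n ≤ 2
  · have : n = 0 ∨ n = 1 ∨ n = 2 := by omega
    rcases this with rfl | rfl | rfl <;> decide
  · obtain ⟨m, rfl⟩ : ∃ m : Nat, n = (m : Int) := ⟨n.toNat, by omega⟩
    have hm3 : 3 ≤ m := by exact_mod_cast by omega
    show solution (m : Int) = solution_alt (m : Int)
    unfold solution
    rw [dp_inv m hm3]
    simp

theorem solution_changed : Claim_changed_solution := by unfold Claim_changed_solution; decide

theorem solution_tight : Claim_exact_solution := by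
  intro n _ hpre hd
  unfold Pre_solution at hpre; unfold D_solution at hd
  interval_cases n <;> decide
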